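-- pv_equiv track=rewrite | github.com/cherneha/metaprogramming | cpp_code_formatter/utils.py | only_spaces_and_special_characters
-- ===== SOURCE A (Python) =====
-- def get_state(prev_state):
--     return {
--         0: choose_from_states,
--         1: choose_from_states,
--         2: lambda x: 3 if x == '/' or x == '*' else 4,
--     }.get(prev_state, 4)
--
-- def choose_from_states(x):
--     if x == '\n' or x == '\t' or x == ' ' or x == ';' or x == ',':
--         return 1
--     elif x == '/':
--         return 2
--     else:
--         return 4
--
-- def only_spaces_and_special_characters(line):
--     prev_state = 0
--     for symbol in line:
--         prev_state = (get_state(prev_state))(symbol)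
--         if prev_state == 3:
--             return True
--         elif prev_state == 4:
--             return False
--     if prev_state == 1 or prev_state == 3 or prev_state == 0:
--         return True
--     return False
-- ===== SOURCE B (Python) =====
-- SPECIAL = {'\n', '\t', ' ', ';', ','}
--
-- def only_spaces_and_special_characters(line):
--     i = 0
--     n = len(line)
--     while i < n and line[i] in SPECIAL:
--         i += 1
--     if i == n:
--         return True
--     if line[i] == '/':
--         return i + 1 < n and line[i + 1] in ('/', '*')
--     return False
-- ===== Notes on version B (the rewrite author's own statement) =====
-- stated objective: simpler
-- what changed: Replaces the dict-dispatch state machine with a skip-the-leading-special-run scan followed by a constant two-character lookahead for a comment start.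
import Mathlib
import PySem

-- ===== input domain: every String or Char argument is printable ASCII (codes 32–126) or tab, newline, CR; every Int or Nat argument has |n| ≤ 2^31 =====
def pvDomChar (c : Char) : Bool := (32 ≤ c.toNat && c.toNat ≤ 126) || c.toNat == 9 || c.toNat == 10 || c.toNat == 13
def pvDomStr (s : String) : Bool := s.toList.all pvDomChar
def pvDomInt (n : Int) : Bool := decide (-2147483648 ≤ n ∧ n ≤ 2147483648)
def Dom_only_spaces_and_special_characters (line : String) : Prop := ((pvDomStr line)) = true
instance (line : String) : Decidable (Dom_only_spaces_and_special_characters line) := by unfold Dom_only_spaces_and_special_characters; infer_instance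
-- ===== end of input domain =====

-- B replaces A's dict-dispatch state machine with a skip-leading-special-run scan
-- plus a constant two-character lookahead (objective: simpler).


-- ===== PORT A =====
def choose_from_states (x : Char) : Int :=
  if x = '\n' ∨ x = '\t' ∨ x = ' ' ∨ x = ';' ∨ x = ',' then 1
  else if x = '/' then 2
  else 4

def get_state (prev_state : Int) : Char → Int :=
  if prev_state = 0 then choose_from_states
  else if prev_state = 1 then choose_from_states
  else if prev_state = 2 then (fun x => if x = '/' ∨ x = '*' then 3 else 4)
  else fun _ => 4

def osascLoop (prev_state : Int) : List Char → Bool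
  | [] => decide (prev_state = 1 ∨ prev_state = 3 ∨ prev_state = 0)
  | symbol :: rest =>
    let s := get_state prev_state symbol
    if s = 3 then true
    else if s = 4 then false
    else osascLoop s rest

def only_spaces_and_special_characters (line : String) : Bool :=
  osascLoop 0 line.toList

-- ===== PORT B =====
def osascSpecial (c : Char) : Bool :=
  c = '\n' || c = '\t' || c = ' ' || c = ';' || c = ','

def osascSkip : List Char → Bool
  | [] => true
  | c :: rest =>
    if osascSpecial c then osascSkip rest
    else if c = '/' then
      match rest with
      | [] => false
      | d :: _ => d = '/' || d = '*'
    else false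

def only_spaces_and_special_characters_alt (line : String) : Bool :=
  osascSkip line.toList

-- ===== PRECONDITION & SPEC =====
def Spec_only_spaces_and_special_characters (line : String) (out : Bool) : Prop := out = only_spaces_and_special_characters_alt line
instance (line : String) (out : Bool) : Decidable (Spec_only_spaces_and_special_characters line out) := by unfold Spec_only_spaces_and_special_characters; infer_instance

-- ===== CLAIM (what is proved, stated in full; the proofs are below) =====
def Claim_equal_only_spaces_and_special_characters : Prop := ∀ (line : String), Dom_only_spaces_and_special_characters line → Spec_only_spaces_and_special_characters line (only_spaces_and_special_characters line)

-- ===== LEMMAS AND PROOFS =====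
theorem osascLoop_two (rest : List Char) :
    osascLoop 2 rest = (match rest with | [] => false | d :: _ => d = '/' || d = '*') := by
  cases rest with
  | nil => decide
  | cons d r =>
    simp only [osascLoop, get_state]
    norm_num
    by_cases h : d = '/' ∨ d = '*' <;> simp [h]

theorem osascLoop_eq_skip (l : List Char) (s : Int) (hs : s = 0 ∨ s = 1) :
    osascLoop s l = osascSkip l := by
  induction l generalizing s with
  | nil => rcases hs with h | h <;> subst h <;> decide
  | cons c rest ih =>
    have hcs : get_state s c = choose_from_states c := by
      rcases hs with h | h <;> subst h <;> simp [get_state]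
    simp only [osascLoop, osascSkip, hcs]
    by_cases h1 : c = '\n' ∨ c = '\t' ∨ c = ' ' ∨ c = ';' ∨ c = ',' 
    · have : osascSpecial c = true := by
        unfold osascSpecial
        rcases h1 with h|h|h|h|h <;> simp [h]
      simp [choose_from_states, h1, this, ih 1 (Or.inr rfl)]
    · have hsp : osascSpecial c = false := by
        unfold osascSpecial
        simp only [Bool.or_eq_false_iff, decide_eq_false_iff_not]
        push Not at h1
        exact ⟨⟨⟨⟨h1.1, h1.2.1⟩, h1.2.2.1⟩, h1.2.2.2.1⟩, h1.2.2.2.2⟩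
      by_cases h2 : c = '/'
      · subst h2
        simp [choose_from_states, hsp, osascLoop_two rest]
      · simp [choose_from_states, h1, h2, hsp]

-- ===== VERDICT (by name: the statement is the Claim_ definition above) =====
theorem only_spaces_and_special_characters_spec : Claim_equal_only_spaces_and_special_characters := by
  intro line _
  unfold Spec_only_spaces_and_special_characters only_spaces_and_special_characters only_spaces_and_special_characters_alt
  exact osascLoop_eq_skip line.toList 0 (Or.inl rfl)
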